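-- pv_equiv track=rewrite | github.com/MeloGD/ASIR | imw/ut1/a9/programa1.py | upper_vowels
-- ===== SOURCE A (Python) =====
-- def upper_vowels(text):
--     vowels = "aeiou"
--     uppvowels = ""
--     for char in text:
--         if char in vowels:
--             uppvowels += char.upper()
--         else:
--             uppvowels += char
--     return uppvowels
-- ===== SOURCE B (Python) =====
-- _TABLE = str.maketrans("aeiou", "AEIOU")
--
-- def upper_vowels(text):
--     return text.translate(_TABLE)
-- ===== Notes on version B (the rewrite author's own statement) =====
-- stated objective: idiomatic
-- what changed: Replaces the explicit char loop with membership test and string accumulator by a precomputed str.maketrans translation table applied with str.translate in one library call.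
import Mathlib
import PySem

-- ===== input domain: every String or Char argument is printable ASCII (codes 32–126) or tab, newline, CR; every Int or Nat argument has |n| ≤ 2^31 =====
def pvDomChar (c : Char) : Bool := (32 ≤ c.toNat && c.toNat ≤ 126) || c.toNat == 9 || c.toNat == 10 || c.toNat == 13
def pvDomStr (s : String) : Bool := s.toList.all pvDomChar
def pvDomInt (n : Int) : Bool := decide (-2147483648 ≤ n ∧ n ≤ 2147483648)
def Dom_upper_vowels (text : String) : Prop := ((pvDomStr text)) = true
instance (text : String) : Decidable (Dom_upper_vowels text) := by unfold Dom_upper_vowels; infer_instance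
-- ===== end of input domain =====

-- B replaces A's explicit loop/membership/accumulator by a precomputed translation
-- table applied in one pass (str.maketrans/str.translate); return values proved equal.

-- ===== PORT A =====
-- for char in text: if char in "aeiou": acc += char.upper() else acc += char
def upper_vowels (text : String) : String :=
  text.toList.foldl
    (fun acc c =>
      if PySem.Chars.isIn [c] "aeiou".toList then
        acc ++ String.ofList (PySem.Chars.upper [c])
      else
        acc ++ String.ofList [c])
    ""

-- ===== PORT B =====
-- the maketrans table: pairs (lowercase vowel, uppercase vowel)
def pvTransTable : List (Char × Char) := List.zip "aeiou".toList "AEIOU".toList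

-- text.translate(table): per-codepoint table lookup applied in one pass
def upper_vowels_alt (text : String) : String :=
  String.ofList (text.toList.map (fun c => (pvTransTable.lookup c).getD c))

-- ===== PRECONDITION & SPEC =====
def Spec_upper_vowels (text : String) (out : String) : Prop := out = upper_vowels_alt text
instance (text : String) (out : String) : Decidable (Spec_upper_vowels text out) := by unfold Spec_upper_vowels; infer_instance

-- ===== CLAIM (what is proved, stated in full; the proofs are below) =====
def Claim_equal_upper_vowels : Prop := ∀ (text : String), Dom_upper_vowels text → Spec_upper_vowels text (upper_vowels text)

-- ===== LEMMAS AND PROOFS =====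

-- a one-char string is "in" s exactly when the char is an element
lemma singleton_isIn_iff (c : Char) (l : List Char) :
    PySem.Chars.isIn [c] l = true ↔ c ∈ l := by
  rw [PySem.Chars.isIn_iff_infix]
  constructor
  · intro h
    exact List.singleton_sublist.mp h.sublist
  · intro h
    obtain ⟨s, t, rfl⟩ := List.append_of_mem h
    exact ⟨s, t, by simp⟩

-- pointwise: translating one char agrees with A's branch for that char
lemma point_eq (c : Char) :
    (if PySem.Chars.isIn [c] "aeiou".toList then String.ofList (PySem.Chars.upper [c]) else String.ofList [c])
      = String.ofList [(pvTransTable.lookup c).getD c] := by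
  by_cases ha : c = 'a'; · subst ha; decide
  by_cases he : c = 'e'; · subst he; decide
  by_cases hi : c = 'i'; · subst hi; decide
  by_cases ho : c = 'o'; · subst ho; decide
  by_cases hu : c = 'u'; · subst hu; decide
  have hmem : ¬ (PySem.Chars.isIn [c] "aeiou".toList = true) := by
    rw [singleton_isIn_iff]
    simp [ha, he, hi, ho, hu]
  have ha' : (c == 'a') = false := by simp [ha]
  have he' : (c == 'e') = false := by simp [he]
  have hi' : (c == 'i') = false := by simp [hi]
  have ho' : (c == 'o') = false := by simp [ho]
  have hu' : (c == 'u') = false := by simp [hu]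
  have hlook : pvTransTable.lookup c = none := by
    simp [pvTransTable, List.lookup, ha', he', hi', ho', hu']
  rw [if_neg hmem, hlook]
  rfl

lemma fold_eq (l : List Char) (acc : String) :
    l.foldl
      (fun acc c =>
        if PySem.Chars.isIn [c] "aeiou".toList then
          acc ++ String.ofList (PySem.Chars.upper [c])
        else
          acc ++ String.ofList [c])
      acc
      = acc ++ String.ofList (l.map (fun c => (pvTransTable.lookup c).getD c)) := by
  induction l generalizing acc with
  | nil =>
    simp
  | cons c cs ih =>
    simp only [List.foldl_cons, List.map_cons, ih]
    have hsplit :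
        (if PySem.Chars.isIn [c] "aeiou".toList then acc ++ String.ofList (PySem.Chars.upper [c])
          else acc ++ String.ofList [c])
          = acc ++ (if PySem.Chars.isIn [c] "aeiou".toList then String.ofList (PySem.Chars.upper [c])
              else String.ofList [c]) := by
      split_ifs <;> rfl
    rw [hsplit, point_eq]
    apply String.ext
    simp

-- ===== VERDICT (by name: the statement is the Claim_ definition above) =====
theorem upper_vowels_spec : Claim_equal_upper_vowels := by
  intro text _
  unfold Spec_upper_vowels upper_vowels upper_vowels_alt
  rw [fold_eq]
  apply String.ext
  simp
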